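-- pv_equiv track=rewrite | github.com/colten-anderson/SystemDesigner | scripts/validate_portfolio.py | extract_filled_output_fields
-- ===== SOURCE A (Python) =====
-- def extract_filled_output_fields(text: str, expected_fields: list[str]) -> dict[str, bool]:
--     filled_map = {field: False for field in expected_fields}
--
--     lines = text.splitlines()
--     for index, line in enumerate(lines):
--         stripped = line.strip()
--         if not stripped.startswith("- **"):
--             continue
--
--         for field in expected_fields:
--             prefix = f"- **{field}:**"
--             if not stripped.startswith(prefix):
--                 continue
--
--             remainder = stripped[len(prefix) :].strip()
--             has_inline_value = bool(remainder and remainder not in {"-", "N/A", "TBD"})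
--             if has_inline_value:
--                 filled_map[field] = True
--                 break
--
--             next_non_empty = ""
--             for next_line in lines[index + 1 :]:
--                 candidate = next_line.strip()
--                 if not candidate:
--                     continue
--                 next_non_empty = candidate
--                 break
--
--             if next_non_empty and not next_non_empty.startswith("-") and not next_non_empty.startswith("##"):
--                 if next_non_empty.upper() not in {"TBD", "TODO", "N/A"}:
--                     filled_map[field] = True
--             break
--
--     return filled_map
-- ===== SOURCE B (Python) =====
-- def extract_filled_output_fields(text: str, expected_fields: list[str]) -> dict[str, bool]:
--     filled_map = {field: False for field in expected_fields}
--
--     stripped_lines = [line.strip() for line in text.splitlines()]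
--
--     # One reverse pass: nxt[i] = first non-empty stripped line strictly after i ("" if none).
--     n = len(stripped_lines)
--     nxt = [""] * n
--     carry = ""
--     for i in range(n - 1, -1, -1):
--         nxt[i] = carry
--         if stripped_lines[i]:
--             carry = stripped_lines[i]
--
--     for i, stripped in enumerate(stripped_lines):
--         if not stripped.startswith("- **"):
--             continue
--         pos = stripped.find(":**", 4)
--         if pos == -1:
--             continue
--         name = stripped[4:pos]
--         if name not in filled_map:
--             continue
--         remainder = stripped[pos + 3 :].strip()
--         if remainder and remainder not in ("-", "N/A", "TBD"):
--             filled_map[name] = True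
--         else:
--             nn = nxt[i]
--             if nn and not nn.startswith("-") and not nn.startswith("##") and nn.upper() not in ("TBD", "TODO", "N/A"):
--                 filled_map[name] = True
--
--     return filled_map
-- ===== Notes on version B (the rewrite author's own statement) =====
-- stated objective: alternative
-- what changed: B parses the field name out of each '- **name:**' line for a single dict lookup instead of scanning all expected fields per line, and precomputes the next-non-empty-line array in one backward pass instead of rescanning the remaining lines for each matched field.
-- outside the precondition, e.g. on extract_filled_output_fields('- **a:**b:** x', ['a:**b']): A returns {'a:**b': True}, B returns {'a:**b': False}
import Mathlib
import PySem

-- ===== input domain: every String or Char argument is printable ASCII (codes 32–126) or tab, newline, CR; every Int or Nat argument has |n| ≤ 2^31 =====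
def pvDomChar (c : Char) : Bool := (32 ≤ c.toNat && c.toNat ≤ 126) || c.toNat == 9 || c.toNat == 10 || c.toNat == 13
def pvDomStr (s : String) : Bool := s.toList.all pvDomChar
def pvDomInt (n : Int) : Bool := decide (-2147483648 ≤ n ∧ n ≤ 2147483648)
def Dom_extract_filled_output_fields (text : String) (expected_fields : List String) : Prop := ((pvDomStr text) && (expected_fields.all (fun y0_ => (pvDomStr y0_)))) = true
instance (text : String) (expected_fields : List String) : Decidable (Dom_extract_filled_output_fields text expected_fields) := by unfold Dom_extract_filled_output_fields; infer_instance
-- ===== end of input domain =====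

-- B replaces A's inner scan over all expected fields by parsing the field name out of the line
-- (first ":**" after the "- **" marker) for a single dict lookup, and replaces A's forward rescan
-- for the next non-empty line by a next-non-empty array built in one backward pass (objective: alternative).

-- ===== PORT A =====
-- {field: False for field in expected_fields}
def pvAInit (expected_fields : List String) : PySem.Dict String Bool :=
  expected_fields.foldl (fun d f => d.insert f false) PySem.Dict.empty

-- the inner 'for next_line in lines[index+1:]' scan: first non-empty stripped line, "" if none
def pvANext : List (List Char) → List Char
  | [] => []
  | l :: rest =>
    let candidate := PySem.Chars.strip l
    if candidate = [] then pvANext rest else candidate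

-- the inner 'for field in expected_fields' loop (with its break); tail = lines[index+1:]
def pvAFields (stripped : List Char) (tail : List (List Char)) :
    List String → PySem.Dict String Bool → PySem.Dict String Bool
  | [], m => m
  | f :: rest, m =>
    let pref := "- **".toList ++ f.toList ++ ":**".toList
    if PySem.Chars.startswith stripped pref then
      -- stripped[len(prefix):].strip()  (len(prefix) ≥ 0, so the slice is a drop)
      let remainder := PySem.Chars.strip (stripped.drop pref.length)
      if remainder ≠ [] ∧ remainder ≠ "-".toList ∧ remainder ≠ "N/A".toList ∧ remainder ≠ "TBD".toList then
        m.insert f true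
      else
        let next_non_empty := pvANext tail
        if next_non_empty ≠ [] ∧ ¬ PySem.Chars.startswith next_non_empty "-".toList
            ∧ ¬ PySem.Chars.startswith next_non_empty "##".toList
            ∧ PySem.Chars.upper next_non_empty ∉ ["TBD".toList, "TODO".toList, "N/A".toList] then
          m.insert f true
        else m
    else pvAFields stripped tail rest m

-- 'for index, line in enumerate(lines)': rest is exactly lines[index+1:]
def pvALines (expected_fields : List String) :
    List (List Char) → PySem.Dict String Bool → PySem.Dict String Bool
  | [], m => m
  | l :: rest, m =>
    let stripped := PySem.Chars.strip l
    let m' := if PySem.Chars.startswith stripped "- **".toList then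
        pvAFields stripped rest expected_fields m else m
    pvALines expected_fields rest m'

def extract_filled_output_fields (text : String) (expected_fields : List String) : List (String × Bool) :=
  (pvALines expected_fields (PySem.Chars.splitlines text.toList) (pvAInit expected_fields)).items

-- ===== PORT B =====
-- backward pass: .1 is the next-non-empty array (aligned with the input), .2 the running carry
def pvBNxt : List (List Char) → List (List Char) × List Char
  | [] => ([], [])
  | s :: rest =>
    let p := pvBNxt rest
    (p.2 :: p.1, if s ≠ [] then s else p.2)

-- one line of B's single forward pass: s is the stripped line, nn its next non-empty line
def pvBStep (m : PySem.Dict String Bool) (s nn : List Char) : PySem.Dict String Bool :=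
  if ¬ PySem.Chars.startswith s "- **".toList then m
  else
    let pos := PySem.Chars.findFrom s ":**".toList 4 none
    if pos = -1 then m
    else
      let name := String.ofList (PySem.Chars.slice s (some 4) (some pos))
      if ¬ m.contains name then m
      else
        let remainder := PySem.Chars.strip (PySem.Chars.slice s (some (pos + 3)) none)
        if remainder ≠ [] ∧ remainder ≠ "-".toList ∧ remainder ≠ "N/A".toList ∧ remainder ≠ "TBD".toList then
          m.insert name true
        else if nn ≠ [] ∧ ¬ PySem.Chars.startswith nn "-".toList
            ∧ ¬ PySem.Chars.startswith nn "##".toList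
            ∧ PySem.Chars.upper nn ∉ ["TBD".toList, "TODO".toList, "N/A".toList] then
          m.insert name true
        else m

def extract_filled_output_fields_alt (text : String) (expected_fields : List String) : List (String × Bool) :=
  let m0 := expected_fields.foldl (fun d f => d.insert f false) PySem.Dict.empty
  let strippedLines := (PySem.Chars.splitlines text.toList).map PySem.Chars.strip
  let nxt := (pvBNxt strippedLines).1
  ((strippedLines.zip nxt).foldl (fun m p => pvBStep m p.1 p.2) m0).items

-- ===== PRECONDITION & SPEC =====
-- Pre_ excludes field names containing ":**": for such a field the boundary between the name and
-- the ":**" marker in "- **name:**" is ambiguous, so A's prefix scan and B's parse can pick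
-- different fields; A still returns there, but either reading is defensible.
def Pre_extract_filled_output_fields (text : String) (expected_fields : List String) : Prop :=
  ∀ f ∈ expected_fields, PySem.Str.isIn ":**" f = false
instance (text : String) (expected_fields : List String) : Decidable (Pre_extract_filled_output_fields text expected_fields) := by unfold Pre_extract_filled_output_fields; infer_instance

def pvWitness_extract_filled_output_fields : String × List String :=
  ("- **Goal:** ship it\n- **Owner:**\nTBD\n", ["Goal", "Owner"])

def Spec_extract_filled_output_fields (text : String) (expected_fields : List String) (out : List (String × Bool)) : Prop := out = extract_filled_output_fields_alt text expected_fields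
instance (text : String) (expected_fields : List String) (out : List (String × Bool)) : Decidable (Spec_extract_filled_output_fields text expected_fields out) := by unfold Spec_extract_filled_output_fields; infer_instance

-- ===== CLAIM (what is proved, stated in full; the proofs are below) =====
def Claim_equal_extract_filled_output_fields : Prop := ∀ (text : String) (expected_fields : List String), Dom_extract_filled_output_fields text expected_fields → Pre_extract_filled_output_fields text expected_fields → Spec_extract_filled_output_fields text expected_fields (extract_filled_output_fields text expected_fields)

-- ===== LEMMAS AND PROOFS =====

-- first non-empty element of an already-stripped list
def pvFirstNE : List (List Char) → List Char
  | [] => []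
  | s :: rest => if s ≠ [] then s else pvFirstNE rest

theorem pvANext_eq (ls : List (List Char)) :
    pvANext ls = pvFirstNE (ls.map PySem.Chars.strip) := by
  induction ls with
  | nil => rfl
  | cons l rest ih => simp only [pvANext, pvFirstNE, List.map, ih]; split_ifs <;> simp_all

theorem pvBNxt_snd (ls : List (List Char)) : (pvBNxt ls).2 = pvFirstNE ls := by
  induction ls with
  | nil => rfl
  | cons s rest ih => simp only [pvBNxt, pvFirstNE, ih]

theorem pvBNxt_cons (s : List Char) (rest : List (List Char)) :
    (pvBNxt (s :: rest)).1 = pvFirstNE rest :: (pvBNxt rest).1 := by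
  simp [pvBNxt, pvBNxt_snd]

-- core string fact: for a field f without ":**", matching A's prefix is the same as equalling
-- the name B parses out (characters 4 .. first occurrence of ":**" from 4)
theorem pvMatch_iff (s : List Char) (f : List Char)
    (hs : "- **".toList <+: s) (hf : ¬ ":**".toList <:+: f)
    {j : Int} (hj : PySem.Chars.find (s.drop 4) ":**".toList = j) (h0 : 0 ≤ j) :
    (("- **".toList ++ f ++ ":**".toList) <+: s) ↔ f = (s.drop 4).take j.toNat := by
  have hlen : ("- **".toList : List Char).length = 4 := rfl
  have htake : s.take 4 = "- **".toList := by
    have := List.prefix_iff_eq_take.mp hs; rw [hlen] at this; exact this.symm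
  have hsplit : s = "- **".toList ++ s.drop 4 := by
    conv_lhs => rw [← List.take_append_drop 4 s, htake]
  set t := s.drop 4 with ht
  set pat := (":**".toList : List Char) with hpat
  obtain ⟨hocc, hmin⟩ := PySem.Chars.find_spec (s := t) (sub := pat) (by rw [hj]; exact h0)
  rw [hj] at hocc hmin
  set J := j.toNat with hJ
  constructor
  · intro h
    rw [hsplit, List.append_assoc, List.prefix_append_right_inj] at h
    obtain ⟨v, hv⟩ := h
    rw [List.append_assoc] at hv
    set L := f.length with hL
    have hdropL : t.drop L = pat ++ v := by rw [← hv, List.drop_left]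
    have hJL : J ≤ L := by
      by_contra hlt
      exact (hmin L (by omega)) (by rw [hdropL]; exact List.prefix_append pat v)
    rcases eq_or_lt_of_le hJL with heq | hlt
    · have hfp : f <+: t := ⟨pat ++ v, hv⟩
      have := List.prefix_iff_eq_take.mp hfp
      rw [← hL, ← heq] at this; exact this
    · exfalso
      by_cases hbig : J + 3 ≤ L
      · -- pat would be an infix of f
        apply hf
        have hdropJ : t.drop J = f.drop J ++ (pat ++ v) := by
          rw [← hv, List.drop_append_of_le_length (by omega)]
        obtain ⟨u, hu⟩ := hocc
        have hlen3 : (pat : List Char).length = 3 := rfl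
        have htk : pat = (f.drop J).take 3 := by
          have : pat = (t.drop J).take 3 := by rw [← hu]; simp [hlen3]
          rw [hdropJ, List.take_append_of_le_length (by simp; omega)] at this
          exact this
        have h1 : pat <+: f.drop J := by rw [htk]; exact List.take_prefix _ _
        exact h1.isInfix.trans (List.drop_suffix J f).isInfix
      · -- L = J+1 or J+2 : character clash
        obtain ⟨u, hu⟩ := hocc
        have h1 : t[L]? = some ':' := by
          rw [← hv, List.getElem?_append_right (le_refl f.length)]
          simp [hpat]
        have hLJ : L - J = 1 ∨ L - J = 2 := by omega
        have h2 : t[L]? = some '*' := by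
          have he : t[L]? = (t.drop J)[L - J]? := by
            conv_rhs => rw [List.getElem?_drop]
            rw [Nat.add_sub_cancel' (le_of_lt hlt)]
          rw [he, ← hu]
          rcases hLJ with h' | h' <;> rw [h'] <;> rfl
        rw [h1] at h2; exact absurd h2 (by decide)
  · intro h
    rw [hsplit, List.append_assoc, List.prefix_append_right_inj]
    obtain ⟨u, hu⟩ := hocc
    refine ⟨u, ?_⟩
    rw [h, List.append_assoc, hu, List.take_append_drop]

theorem pvNoMatch (s : List Char) (f : List Char)
    (hs : "- **".toList <+: s)
    (hj : PySem.Chars.find (s.drop 4) ":**".toList = -1) :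
    ¬ (("- **".toList ++ f ++ ":**".toList) <+: s) := by
  intro h
  rw [PySem.Chars.find_eq_neg_one_iff] at hj
  apply hj
  have hlen : ("- **".toList : List Char).length = 4 := rfl
  have htake : s.take 4 = "- **".toList := by
    have := List.prefix_iff_eq_take.mp hs; rw [hlen] at this; exact this.symm
  have hsplit : s = "- **".toList ++ s.drop 4 := by
    conv_lhs => rw [← List.take_append_drop 4 s, htake]
  rw [hsplit, List.append_assoc, List.prefix_append_right_inj] at h
  exact List.IsInfix.trans (List.suffix_append f ":**".toList).isInfix h.isInfix

theorem pvAFields_nomatch (s : List Char) (tail : List (List Char)) (fields : List String)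
    (m : PySem.Dict String Bool)
    (h : ∀ f ∈ fields, ¬ (("- **".toList ++ f.toList ++ ":**".toList) <+: s)) :
    pvAFields s tail fields m = m := by
  induction fields with
  | nil => rfl
  | cons f rest ih =>
    simp only [pvAFields]
    rw [if_neg]
    · exact ih (fun g hg => h g (List.mem_cons_of_mem f hg))
    · simp only [PySem.Chars.startswith_iff]; exact h f (List.mem_cons_self ..)

def pvABody (s : List Char) (tail : List (List Char)) (name : String)
    (m : PySem.Dict String Bool) : PySem.Dict String Bool :=
  let pref := "- **".toList ++ name.toList ++ ":**".toList
  let remainder := PySem.Chars.strip (s.drop pref.length)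
  if remainder ≠ [] ∧ remainder ≠ "-".toList ∧ remainder ≠ "N/A".toList ∧ remainder ≠ "TBD".toList then
    m.insert name true
  else
    let next_non_empty := pvANext tail
    if next_non_empty ≠ [] ∧ ¬ PySem.Chars.startswith next_non_empty "-".toList
        ∧ ¬ PySem.Chars.startswith next_non_empty "##".toList
        ∧ PySem.Chars.upper next_non_empty ∉ ["TBD".toList, "TODO".toList, "N/A".toList] then
      m.insert name true
    else m

theorem pvAFields_found (s : List Char) (tail : List (List Char)) (fields : List String)
    (m : PySem.Dict String Bool) (name : String)
    (hiff : ∀ f ∈ fields, ((("- **".toList ++ f.toList ++ ":**".toList) <+: s) ↔ f = name))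
    (hmem : name ∈ fields) :
    pvAFields s tail fields m = pvABody s tail name m := by
  induction fields with
  | nil => exact absurd hmem (by simp)
  | cons f rest ih =>
    by_cases hfn : f = name
    · subst hfn
      simp only [pvAFields]
      rw [if_pos (by simp only [PySem.Chars.startswith_iff]; exact (hiff f (List.mem_cons_self ..)).mpr rfl)]
      rfl
    · simp only [pvAFields]
      rw [if_neg (by simp only [PySem.Chars.startswith_iff]
                     exact fun hp => hfn ((hiff f (List.mem_cons_self ..)).mp hp))]
      refine ih (fun g hg => hiff g (List.mem_cons_of_mem f hg)) ?_
      rcases List.mem_cons.mp hmem with h | h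
      · exact absurd h.symm hfn
      · exact h

-- one line: A's inner field loop agrees with B's parse-and-lookup step
theorem pvLine_eq (s : List Char) (tail : List (List Char)) (fields : List String)
    (m : PySem.Dict String Bool)
    (hpre : ∀ f ∈ fields, PySem.Str.isIn ":**" f = false)
    (hkeys : ∀ k, m.contains k = true ↔ k ∈ fields) :
    (if PySem.Chars.startswith s "- **".toList then pvAFields s tail fields m else m)
      = pvBStep m s (pvFirstNE (tail.map PySem.Chars.strip)) := by
  have hpre' : ∀ f ∈ fields, ¬ (":**".toList <:+: f.toList) := by
    intro f hf
    have h := hpre f hf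
    simp only [PySem.Str.isIn] at h
    rw [← PySem.Chars.isIn_eq_false_iff]
    exact h
  by_cases h1 : PySem.Chars.startswith s "- **".toList = true
  case neg =>
    have h1' : PySem.Chars.startswith s "- **".toList = false := by simpa using h1
    rw [if_neg h1]
    simp only [pvBStep, h1']
    simp
  have hs : "- **".toList <+: s := (PySem.Chars.startswith_iff s _).mp h1
  have hlen4 : 4 ≤ s.length := by
    have := hs.length_le; simpa using this
  have hffrom : PySem.Chars.findFrom s ":**".toList 4 none
      = (if PySem.Chars.find (s.drop 4) ":**".toList = -1 then (-1 : Int)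
         else 4 + PySem.Chars.find (s.drop 4) ":**".toList) := by
    have h := PySem.Chars.findFrom_natCast s ":**".toList 4 hlen4
    norm_num at h ⊢
    exact h
  rw [if_pos h1]
  by_cases hneg : PySem.Chars.find (s.drop 4) ":**".toList = -1
  · rw [pvAFields_nomatch s tail fields m (fun f hf => pvNoMatch s f.toList hs hneg)]
    simp only [pvBStep, h1, hffrom, hneg]
    simp
  · set j := PySem.Chars.find (s.drop 4) ":**".toList with hj
    have h0 : 0 ≤ j := by
      rcases (PySem.Chars.neg_one_le_find (s.drop 4) ":**".toList).lt_or_eq with h | h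
      · omega
      · exact absurd h.symm hneg
    have hjlen : j.toNat ≤ (s.drop 4).length := by
      have := PySem.Chars.find_le_length (s.drop 4) ":**".toList
      omega
    set nameL := (s.drop 4).take j.toNat with hnameL
    have hnames : (String.ofList nameL).toList = nameL := String.toList_ofList
    have hslice : PySem.Chars.slice s (some 4) (some (4 + j)) = nameL := by
      rw [PySem.Chars.slice_eq_listSlice,
        PySem.List.slice_toNat s (by norm_num) (by omega)]
      rw [hnameL]
      congr 1
      omega
    have hiff : ∀ f ∈ fields,
        ((("- **".toList ++ f.toList ++ ":**".toList) <+: s) ↔ f = String.ofList nameL) := by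
      intro f hf
      rw [pvMatch_iff s f.toList hs (hpre' f hf) hj.symm h0]
      constructor
      · intro h
        rw [← String.ofList_toList (s := f), h]
      · intro h
        rw [h, hnames]
    have hlen_name : nameL.length = j.toNat := by
      rw [hnameL, List.length_take]
      omega
    have hpos : PySem.Chars.findFrom s ":**".toList 4 none = 4 + j := by
      rw [hffrom, if_neg hneg]
    simp only [pvBStep, h1, hpos]
    rw [if_neg (by omega : ¬ (4 + j = -1))]
    rw [hslice]
    by_cases hmem : String.ofList nameL ∈ fields
    · rw [pvAFields_found s tail fields m _ hiff hmem]
      have hcont : m.contains (String.ofList nameL) = true := (hkeys _).mpr hmem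
      rw [if_neg (show ¬ (¬ m.contains (String.ofList nameL) = true) by simp [hcont])]
      have hrem : PySem.Chars.slice s (some (4 + j + 3)) none = s.drop (j.toNat + 7) := by
        rw [PySem.Chars.slice_eq_listSlice, PySem.List.slice_from s (by omega)]
        congr 1
        omega
      rw [hrem]
      simp only [pvABody]
      have hpl : ("- **".toList ++ (String.ofList nameL).toList ++ ":**".toList).length
          = j.toNat + 7 := by
        rw [hnames]
        simp [hlen_name]
      rw [hpl, pvANext_eq]
      rfl
    · have hcont : m.contains (String.ofList nameL) = false := by
        rcases h : m.contains (String.ofList nameL) with _ | _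
        · rfl
        · exact absurd ((hkeys _).mp h) hmem
      rw [if_pos (show ¬ m.contains (String.ofList nameL) = true by simp [hcont])]
      exact pvAFields_nomatch s tail fields m
        (fun f hf hp => hmem (((hiff f hf).mp hp) ▸ hf))

-- keys are preserved by one B step
theorem pvBStep_contains (m : PySem.Dict String Bool) (s nn : List Char) (k : String) :
    (pvBStep m s nn).contains k = m.contains k := by
  have key : ∀ (a : String) (v : Bool), m.contains a = true →
      (m.insert a v).contains k = m.contains k := by
    intro a v ha
    rw [PySem.Dict.contains_insert]
    by_cases hk : k = a
    · subst hk; simp [ha]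
    · simp [hk]
  simp only [pvBStep]
  split_ifs <;> first | rfl | (apply key; simp_all)

-- main loop: A's pass over raw lines = B's fold over stripped lines zipped with the nxt array
theorem pvLoop_eq (fields : List String) (hpre : ∀ f ∈ fields, PySem.Str.isIn ":**" f = false)
    (lines : List (List Char)) (m : PySem.Dict String Bool)
    (hkeys : ∀ k, m.contains k = true ↔ k ∈ fields) :
    pvALines fields lines m
      = ((lines.map PySem.Chars.strip).zip (pvBNxt (lines.map PySem.Chars.strip)).1).foldl
          (fun m p => pvBStep m p.1 p.2) m := by
  induction lines generalizing m with
  | nil => rfl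
  | cons l rest ih =>
    have hstep := pvLine_eq (PySem.Chars.strip l) rest fields m hpre hkeys
    simp only [List.map, pvBNxt_cons, List.zip_cons_cons, List.foldl_cons]
    rw [← hstep]
    simp only [pvALines]
    apply ih
    intro k
    rw [show (if PySem.Chars.startswith (PySem.Chars.strip l) "- **".toList then
        pvAFields (PySem.Chars.strip l) rest fields m else m)
      = pvBStep m (PySem.Chars.strip l) (pvFirstNE (rest.map PySem.Chars.strip)) from hstep]
    rw [pvBStep_contains]
    exact hkeys k

theorem pvInit_contains (fields : List String) (k : String) :
    (pvAInit fields).contains k = true ↔ k ∈ fields := by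
  rw [PySem.Dict.contains_iff_mem_keys]
  unfold pvAInit
  rw [PySem.Dict.keys_foldl_insert fields (fun _ _ => false) PySem.Dict.empty]
  rw [PySem.Dict.keys_empty]
  rw [PySem.Set.mem_update]
  simp

-- ===== VERDICT (by name: the statement is the Claim_ definition above) =====
theorem extract_filled_output_fields_spec : Claim_equal_extract_filled_output_fields := by
  intro text fields _ hpre
  unfold Spec_extract_filled_output_fields extract_filled_output_fields extract_filled_output_fields_alt
  rw [pvLoop_eq fields hpre _ _ (pvInit_contains fields)]
  rfl
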